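-- pv_equiv track=rewrite | github.com/pypi-data/pypi-mirror-384 | packages/codetective/codetective-0.1.0.tar.gz/codetective-0.1.0/codetective/agents/output/edit_agent.py | _extract_largest_code_block
-- ===== SOURCE A (Python) =====
-- def _extract_largest_code_block(response: str) -> str:
--     """Extract the largest block that looks like code."""
--     lines = response.split("\n")
--     current_block: list[str] = []
--     largest_block: list[str] = []
--
--     for line in lines:
--         stripped = line.strip()
--
--         # Skip obvious non-code lines
--         if any(
--             stripped.lower().startswith(phrase)
--             for phrase in ["here is", "here's", "the code", "explanation", "note:", "i fixed", "i changed"]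
--         ):
--             if len(current_block) > len(largest_block):
--                 largest_block = current_block[:]
--             current_block = []
--             continue
--
--         # Skip markdown markers
--         if stripped.startswith("```"):
--             continue
--
--         current_block.append(line)
--
--     # Check final block
--     if len(current_block) > len(largest_block):
--         largest_block = current_block
--
--     return "\n".join(largest_block).strip()
-- ===== SOURCE B (Python) =====
-- def _extract_largest_code_block(response: str) -> str:
--     """Extract the largest block that looks like code."""
--     return "\n".join(_best_block(response.split("\n"))).strip()
--
--
-- _PHRASES = ["here is", "here's", "the code", "explanation", "note:", "i fixed", "i changed"]
--
--
-- def _is_sep(line: str) -> bool: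
--     return any(line.strip().lower().startswith(p) for p in _PHRASES)
--
--
-- def _is_fence(line: str) -> bool:
--     return line.strip().startswith("```")
--
--
-- def _best_block(lines: list[str]) -> list[str]:
--     # Divide and conquer on the first separator line: the candidate before it
--     # (fences filtered out) is compared against the best of the remainder;
--     # the earlier candidate wins ties, so the first longest block is returned.
--     i = next((k for k, l in enumerate(lines) if _is_sep(l)), None)
--     if i is None:
--         return [l for l in lines if not _is_fence(l)]
--     head = [l for l in lines[:i] if not _is_fence(l)]
--     rest = _best_block(lines[i + 1:])
--     return head if len(head) >= len(rest) else rest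
-- ===== Notes on version B (the rewrite author's own statement) =====
-- stated objective: alternative
-- what changed: A's single-pass state machine with current/largest accumulators is replaced by a divide-and-conquer recursion: find the index of the first separator line, filter fences out of the leading slice with a comprehension, and compare it against the recursively computed best of the tail slice (earlier block wins ties); no running best-so-far accumulator exists.
import Mathlib
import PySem

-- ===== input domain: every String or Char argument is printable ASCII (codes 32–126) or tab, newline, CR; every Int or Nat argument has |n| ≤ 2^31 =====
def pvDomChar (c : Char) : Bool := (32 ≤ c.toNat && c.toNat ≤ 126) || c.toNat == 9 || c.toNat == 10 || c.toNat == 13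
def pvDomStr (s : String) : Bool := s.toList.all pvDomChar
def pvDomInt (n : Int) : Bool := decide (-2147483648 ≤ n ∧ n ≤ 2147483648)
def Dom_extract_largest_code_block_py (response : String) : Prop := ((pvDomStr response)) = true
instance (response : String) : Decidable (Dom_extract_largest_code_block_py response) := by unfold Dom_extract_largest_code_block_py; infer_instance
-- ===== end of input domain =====

-- B replaces A's one-pass current/largest state machine by a divide-and-conquer
-- recursion on the first separator line (leading segment filtered of fences,
-- compared against the best of the remainder); objective: alternative.

-- helpers shared by both ports: the two line predicates both Pythons compute verbatim
def pvSepLine (line : String) : Bool :=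
  (["here is", "here's", "the code", "explanation", "note:", "i fixed", "i changed"] : List String).any
    (fun phrase => PySem.Str.startswith (PySem.Str.lower (PySem.Str.strip line)) phrase)

def pvFenceLine (line : String) : Bool :=
  PySem.Str.startswith (PySem.Str.strip line) "```"

-- ===== PORT A =====
-- loop state: (current_block, largest_block)
def pvStepA (st : List String × List String) (line : String) : List String × List String :=
  if pvSepLine line then
    if st.1.length > st.2.length then ([], st.1) else ([], st.2)
  else if pvFenceLine line then st
  else (st.1 ++ [line], st.2)

def extract_largest_code_block_py (response : String) : String :=
  let lines := (PySem.Str.split? response "\n").getD []  -- sep "\n" ≠ "", so split? is always some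
  let st := lines.foldl pvStepA ([], [])
  let largest := if st.1.length > st.2.length then st.1 else st.2
  PySem.Str.strip (PySem.Str.join "\n" largest)

-- ===== PORT B =====
-- termination helper for pv_best_block (cited by decreasing_by)
theorem pv_findIdx?_lt (p : String → Bool) (ls : List String) (i : Nat)
    (h : ls.findIdx? p = some i) : i < ls.length := by
  have := List.findIdx?_eq_some_iff_findIdx_eq.mp h
  omega

-- _best_block: find the first separator index (next(… enumerate …));
-- no separator → the fence-filtered whole list; otherwise compare the
-- fence-filtered leading slice against the recursive best of the tail slice.
-- (i is a Nat with i < length, so take/drop are exact for lines[:i] / lines[i+1:])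
def pv_best_block (lines : List String) : List String :=
  match h : lines.findIdx? pvSepLine with
  | none => lines.filter (fun l => !pvFenceLine l)
  | some i =>
      let head := (lines.take i).filter (fun l => !pvFenceLine l)
      let rest := pv_best_block (lines.drop (i + 1))
      if rest.length ≤ head.length then head else rest
termination_by lines.length
decreasing_by
  have := pv_findIdx?_lt pvSepLine lines i h
  simp [List.length_drop]; omega

def extract_largest_code_block_py_alt (response : String) : String :=
  let lines := (PySem.Str.split? response "\n").getD []  -- sep "\n" ≠ "", so split? is always some
  PySem.Str.strip (PySem.Str.join "\n" (pv_best_block lines))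

-- ===== PRECONDITION & SPEC =====
def Spec_extract_largest_code_block_py (response : String) (out : String) : Prop := out = extract_largest_code_block_py_alt response
instance (response : String) (out : String) : Decidable (Spec_extract_largest_code_block_py response out) := by unfold Spec_extract_largest_code_block_py; infer_instance

-- ===== CLAIM (what is proved, stated in full; the proofs are below) =====
def Claim_equal_extract_largest_code_block_py : Prop := ∀ (response : String), Dom_extract_largest_code_block_py response → Spec_extract_largest_code_block_py response (extract_largest_code_block_py response)

-- ===== LEMMAS AND PROOFS =====

-- structural middle-man: best block of `ls` with open current block `cur`
def pvBB (ls : List String) (cur : List String) : List String :=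
  match ls with
  | [] => cur
  | l :: ls =>
      if pvSepLine l then
        if (pvBB ls []).length ≤ cur.length then cur else pvBB ls []
      else if pvFenceLine l then pvBB ls cur
      else pvBB ls (cur ++ [l])

-- B's find-first-separator recursion computes pvBB
theorem pvBB_eq_find (ls : List String) : ∀ cur : List String,
    pvBB ls cur =
      match ls.findIdx? pvSepLine with
      | none => cur ++ ls.filter (fun l => !pvFenceLine l)
      | some i =>
          if (pv_best_block (ls.drop (i + 1))).length
              ≤ (cur ++ (ls.take i).filter (fun l => !pvFenceLine l)).length
          then cur ++ (ls.take i).filter (fun l => !pvFenceLine l)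
          else pv_best_block (ls.drop (i + 1)) := by
  induction ls with
  | nil => intro cur; simp [pvBB]
  | cons l ls ih =>
      intro cur
      by_cases hs : pvSepLine l
      · have hbp : pv_best_block ls = pvBB ls [] := by
          rw [pv_best_block, ih []]
          split <;> rename_i heq <;> simp [heq]
        simp [pvBB, hs, List.findIdx?_cons, hbp]
      · by_cases hf : pvFenceLine l
        · rw [List.findIdx?_cons, if_neg hs]
          cases hfi : ls.findIdx? pvSepLine with
          | none => simp [pvBB, hs, hf, ih cur, hfi]
          | some i =>
              simp only [pvBB, hs, hf, Bool.false_eq_true, if_false, if_true, ih cur, hfi,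
                Option.map_some, List.take_succ_cons, List.drop_succ_cons, List.filter_cons]
              simp
        · rw [List.findIdx?_cons, if_neg hs]
          cases hfi : ls.findIdx? pvSepLine with
          | none => simp [pvBB, hs, hf, ih (cur ++ [l]), hfi]
          | some i =>
              simp only [pvBB, hs, hf, Bool.false_eq_true, if_false, ih (cur ++ [l]), hfi,
                Option.map_some, List.take_succ_cons, List.drop_succ_cons, List.filter_cons]
              simp

theorem pv_best_block_eq (ls : List String) : pv_best_block ls = pvBB ls [] := by
  rw [pv_best_block, pvBB_eq_find ls []]
  split <;> rename_i heq <;> simp [heq]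

def pvFinal (st : List String × List String) : List String :=
  if st.1.length > st.2.length then st.1 else st.2

-- A's fold equals the first-longest selection between the running largest and pvBB
theorem pvA_eq (ls : List String) : ∀ cur lar : List String,
    pvFinal (ls.foldl pvStepA (cur, lar)) =
      if (pvBB ls cur).length ≤ lar.length then lar else pvBB ls cur := by
  induction ls with
  | nil =>
      intro cur lar
      simp only [List.foldl_nil, pvFinal, pvBB, gt_iff_lt]
      split_ifs <;> first | rfl | omega
  | cons l ls ih =>
      intro cur lar
      by_cases hs : pvSepLine l
      · have hstep : pvStepA (cur, lar) l =
            ([], if cur.length > lar.length then cur else lar) := by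
          unfold pvStepA
          simp only [hs, if_true]
          split <;> rfl
        rw [List.foldl_cons, hstep, ih]
        simp only [pvBB, hs, if_true, gt_iff_lt]
        split_ifs <;> first | rfl | omega
      · by_cases hf : pvFenceLine l
        · have hstep : pvStepA (cur, lar) l = (cur, lar) := by
            unfold pvStepA; simp [hs, hf]
          rw [List.foldl_cons, hstep, ih]
          simp [pvBB, hs, hf]
        · have hstep : pvStepA (cur, lar) l = (cur ++ [l], lar) := by
            unfold pvStepA; simp [hs, hf]
          rw [List.foldl_cons, hstep, ih]
          simp [pvBB, hs, hf]

-- ===== VERDICT (by name: the statement is the Claim_ definition above) =====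
theorem extract_largest_code_block_py_spec : Claim_equal_extract_largest_code_block_py := by
  unfold Claim_equal_extract_largest_code_block_py Spec_extract_largest_code_block_py
  intro response _
  simp only [extract_largest_code_block_py, extract_largest_code_block_py_alt]
  rw [pv_best_block_eq]
  have h := pvA_eq ((PySem.Str.split? response "\n").getD []) [] []
  rw [show pvFinal (((PySem.Str.split? response "\n").getD []).foldl pvStepA ([], [])) =
      (let st := ((PySem.Str.split? response "\n").getD []).foldl pvStepA ([], []);
        if st.1.length > st.2.length then st.1 else st.2) from rfl] at h
  rw [h]
  split_ifs with hle
  · have : pvBB ((PySem.Str.split? response "\n").getD []) [] = [] :=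
      List.eq_nil_of_length_eq_zero (Nat.le_zero.mp (by simpa using hle))
    rw [this]
  · rfl
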